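-- pv_equiv track=rewrite | github.com/tayybanaz/Bechdel-Test | bechdel_test.py | second_bechdel_score
-- ===== SOURCE A (Python) =====
-- def second_bechdel_score(semi_clean_data, female_names):
--     """
--             second_bechdel_score = 'Do these female characters have a conversation with one another? '.
--
--             :param semi_clean_data: contains all the speaker names in the given script
--             :param female_names: contains all the female names present in a given script
--
--             :return female_talking: 1 or 0 ~ 1 for two female characters talking to each other
--
--     """
--     female_talking = 0
--     for i in range(0, len(semi_clean_data) - 1):
--         if semi_clean_data[i].lower() in female_names and semi_clean_data[i + 1].lower() in female_names and \
--                 semi_clean_data[i].lower() != semi_clean_data[i + 1].lower():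
--             female_talking = 1
--             break
--
--     return female_talking
-- ===== SOURCE B (Python) =====
-- def second_bechdel_score(semi_clean_data, female_names):
--     prev = None
--     for i, name in enumerate(semi_clean_data):
--         if name.lower() in female_names:
--             if prev is not None and i == prev + 1 and \
--                     semi_clean_data[prev].lower() != semi_clean_data[i].lower():
--                 return 1
--             prev = i
--     return 0
-- ===== Notes on version B (the rewrite author's own statement) =====
-- stated objective: alternative
-- what changed: B replaces A's scan over every adjacent index pair (two membership tests per pair) with a single stateful pass over enumerate that remembers the last female-speaker position and fires when the current female position is adjacent to it with a different lowercased name.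
import Mathlib
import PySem

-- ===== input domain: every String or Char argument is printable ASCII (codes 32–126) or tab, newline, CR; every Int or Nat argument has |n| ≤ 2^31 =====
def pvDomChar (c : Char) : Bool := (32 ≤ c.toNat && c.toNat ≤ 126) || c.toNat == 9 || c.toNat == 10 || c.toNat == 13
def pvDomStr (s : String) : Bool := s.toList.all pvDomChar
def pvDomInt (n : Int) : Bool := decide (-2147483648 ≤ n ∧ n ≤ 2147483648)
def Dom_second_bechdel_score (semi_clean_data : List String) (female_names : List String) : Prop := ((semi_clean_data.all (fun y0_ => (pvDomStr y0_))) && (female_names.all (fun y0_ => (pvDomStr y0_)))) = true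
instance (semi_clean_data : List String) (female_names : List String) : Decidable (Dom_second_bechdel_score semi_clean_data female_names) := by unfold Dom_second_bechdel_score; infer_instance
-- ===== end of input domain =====

-- B replaces A's scan of every adjacent pair (two membership tests per position) by a
-- single stateful pass that remembers the last female-speaker position (alternative
-- decomposition, same result); proved equal on all inputs.

-- ===== PORT A =====
-- A's loop body condition on index i (indices produced by range(0, len-1) are always in
-- range, so the pyGetD default "" is never used).
def pvCondA (semi_clean_data : List String) (female_names : List String) (i : Int) : Bool :=
  female_names.contains (PySem.Str.lower (PySem.List.pyGetD semi_clean_data i ""))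
    && female_names.contains (PySem.Str.lower (PySem.List.pyGetD semi_clean_data (i + 1) ""))
    && PySem.Str.lower (PySem.List.pyGetD semi_clean_data i "")
         != PySem.Str.lower (PySem.List.pyGetD semi_clean_data (i + 1) "")

-- the 'for i in range(...): if …: female_talking = 1; break' loop
def pvALoop (semi_clean_data : List String) (female_names : List String) : List Int → Int
  | [] => 0
  | i :: rest =>
    if pvCondA semi_clean_data female_names i then 1
    else pvALoop semi_clean_data female_names rest

def second_bechdel_score (semi_clean_data : List String) (female_names : List String) : Int :=
  pvALoop semi_clean_data female_names
    (PySem.List.pyRange 0 (PySem.List.len semi_clean_data - 1) 1)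

-- ===== PORT B =====
-- the 'for i, name in enumerate(...)' loop carrying prev (last female position, None at start)
def pvBLoop (d : List String) (fn : List String) : Option Int → List (Int × String) → Int
  | _, [] => 0
  | prev, (i, name) :: rest =>
    if fn.contains (PySem.Str.lower name) then
      if (match prev with
          | some p => i == p + 1
              && PySem.Str.lower (PySem.List.pyGetD d p "")
                   != PySem.Str.lower (PySem.List.pyGetD d i "")
          | none => false) then 1
      else pvBLoop d fn (some i) rest
    else pvBLoop d fn prev rest

def second_bechdel_score_alt (semi_clean_data : List String) (female_names : List String) : Int :=
  pvBLoop semi_clean_data female_names none (PySem.List.enumerate semi_clean_data)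

-- ===== PRECONDITION & SPEC =====
def Spec_second_bechdel_score (semi_clean_data : List String) (female_names : List String) (out : Int) : Prop := out = second_bechdel_score_alt semi_clean_data female_names
instance (semi_clean_data : List String) (female_names : List String) (out : Int) : Decidable (Spec_second_bechdel_score semi_clean_data female_names out) := by unfold Spec_second_bechdel_score; infer_instance

-- ===== CLAIM (what is proved, stated in full; the proofs are below) =====
def Claim_equal_second_bechdel_score : Prop := ∀ (semi_clean_data : List String) (female_names : List String), Dom_second_bechdel_score semi_clean_data female_names → Spec_second_bechdel_score semi_clean_data female_names (second_bechdel_score semi_clean_data female_names)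

-- ===== LEMMAS AND PROOFS =====

-- the pair predicate B effectively tests on consecutive female positions
def pvCondB (semi_clean_data : List String) (p : Int × Int) : Bool :=
  p.2 == p.1 + 1
    && PySem.Str.lower (PySem.List.pyGetD semi_clean_data p.1 "")
         != PySem.Str.lower (PySem.List.pyGetD semi_clean_data p.2 "")

-- the female positions B's pass records, over a list of (index, name) pairs
def pvFemOf (fn : List String) (e : List (Int × String)) : List Int :=
  (e.filter (fun p => fn.contains (PySem.Str.lower p.2))).map (·.1)

def pvFem (d fn : List String) : List Int := pvFemOf fn (PySem.List.enumerate d)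

def pvOptCons : Option Int → List Int → List Int
  | none, l => l
  | some p, l => p :: l

lemma pv_ite_or (C X : Bool) :
    (if C = true then (1 : Int) else if X = true then 1 else 0)
      = if (C || X) = true then 1 else 0 := by
  cases C <;> cases X <;> rfl

-- existence of a good consecutive pair in an index list
def pvScan (d : List String) (l : List Int) : Int :=
  if (l.zip l.tail).any (pvCondB d) then 1 else 0

lemma pvALoop_eq_any (d fn : List String) (l : List Int) :
    pvALoop d fn l = if l.any (pvCondA d fn) then 1 else 0 := by
  induction l with
  | nil => rfl
  | cons i rest ih =>
    simp only [pvALoop, List.any_cons, ih]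
    by_cases h : pvCondA d fn i <;> simp [h]

lemma pvBLoop_eq_scan (d fn : List String) (e : List (Int × String)) :
    ∀ prev : Option Int, pvBLoop d fn prev e = pvScan d (pvOptCons prev (pvFemOf fn e)) := by
  induction e with
  | nil => intro prev; cases prev <;> rfl
  | cons q rest ih =>
    intro prev
    obtain ⟨i, name⟩ := q
    by_cases hf : fn.contains (PySem.Str.lower name) = true
    · have hfem : pvFemOf fn ((i, name) :: rest) = i :: pvFemOf fn rest := by
        simp [pvFemOf, List.contains_iff_mem.mp hf]
      rw [hfem]
      cases prev with
      | none =>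
        show (if fn.contains (PySem.Str.lower name) = true then
                if (false : Bool) = true then 1 else pvBLoop d fn (some i) rest
              else pvBLoop d fn none rest) = _
        rw [if_pos hf, if_neg (by simp), ih (some i)]
        rfl
      | some p =>
        have hq : (i == p + 1
            && PySem.Str.lower (PySem.List.pyGetD d p "")
                 != PySem.Str.lower (PySem.List.pyGetD d i "")) = pvCondB d (p, i) := rfl
        show (if fn.contains (PySem.Str.lower name) = true then
                if (i == p + 1
                    && PySem.Str.lower (PySem.List.pyGetD d p "")
                         != PySem.Str.lower (PySem.List.pyGetD d i "")) = true then 1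
                else pvBLoop d fn (some i) rest
              else pvBLoop d fn (some p) rest) = _
        rw [if_pos hf, hq, ih (some i)]
        show (if pvCondB d (p, i) = true then 1 else pvScan d (i :: pvFemOf fn rest))
            = pvScan d (p :: i :: pvFemOf fn rest)
        simp only [pvScan, List.tail_cons, List.zip_cons_cons, List.any_cons]
        exact pv_ite_or _ _
    · have hfem : pvFemOf fn ((i, name) :: rest) = pvFemOf fn rest := by
        have hf' : ¬ PySem.Str.lower name ∈ fn := fun hmem => hf (List.contains_iff_mem.mpr hmem)
        simp [pvFemOf, hf']
      rw [hfem]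
      show (if fn.contains (PySem.Str.lower name) = true then _
            else pvBLoop d fn prev rest) = _
      rw [if_neg hf, ih prev]

-- fem as a plain filter of the index range
lemma pvFem_eq_filter (d fn : List String) :
    pvFem d fn = (PySem.List.pyRange 0 (PySem.List.len d) 1).filter
      (fun j => fn.contains (PySem.Str.lower (PySem.List.pyGetD d j ""))) := by
  rw [pvFem, pvFemOf, PySem.List.enumerate_eq_map_pyRange d "", List.filter_map, List.map_map]
  simp [Function.comp_def]

lemma pvFem_mem (d fn : List String) (i : Int) :
    i ∈ pvFem d fn ↔
      (0 ≤ i ∧ i < PySem.List.len d) ∧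
        PySem.Str.lower (PySem.List.pyGetD d i "") ∈ fn := by
  rw [pvFem_eq_filter]
  simp [List.mem_filter, PySem.List.mem_pyRange_one]

lemma pvFem_pairwise (d fn : List String) : (pvFem d fn).Pairwise (· < ·) := by
  rw [pvFem_eq_filter]
  exact (PySem.List.pairwise_lt_pyRange_one 0 (PySem.List.len d)).filter _

-- in a strictly increasing integer list, members a and a+1 occur as an adjacent pair
lemma adj_mem_zip : ∀ (l : List Int), l.Pairwise (· < ·) →
    ∀ a : Int, a ∈ l → a + 1 ∈ l → (a, a + 1) ∈ l.zip l.tail := by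
  intro l
  induction l with
  | nil => intro _ a ha _; simp at ha
  | cons x rest ih =>
    intro hp a ha hb
    cases rest with
    | nil =>
      simp only [List.mem_singleton] at ha hb
      omega
    | cons y rest' =>
      have hxy : x < y := (List.pairwise_cons.mp hp).1 y (by simp)
      have hptail := (List.pairwise_cons.mp hp).2
      by_cases hax : a = x
      · subst hax
        rcases List.mem_cons.mp hb with h1 | hb'
        · omega
        · rcases List.mem_cons.mp hb' with h2 | hb''
          · rw [← h2] at hxy ⊢
            simp [List.zip_cons_cons]
          · have hy : y < a + 1 := (List.pairwise_cons.mp hptail).1 _ hb''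
            omega
      · have ha' : a ∈ y :: rest' := by
          rcases List.mem_cons.mp ha with h | h
          · exact absurd h hax
          · exact h
        have hb' : a + 1 ∈ y :: rest' := by
          rcases List.mem_cons.mp hb with h | h
          · have : x < a := (List.pairwise_cons.mp hp).1 a ha'
            omega
          · exact h
        have hmem := ih hptail a ha' hb'
        simp only [List.tail_cons] at hmem ⊢
        rw [List.zip_cons_cons]
        exact List.mem_cons_of_mem _ hmem

-- the two existence tests coincide
lemma any_eq (d fn : List String) :
    (PySem.List.pyRange 0 (PySem.List.len d - 1) 1).any (pvCondA d fn)
      = ((pvFem d fn).zip ((pvFem d fn).tail)).any (pvCondB d) := by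
  have h : ((PySem.List.pyRange 0 (PySem.List.len d - 1) 1).any (pvCondA d fn) = true)
      ↔ (((pvFem d fn).zip ((pvFem d fn).tail)).any (pvCondB d) = true) := by
    simp only [List.any_eq_true]
    constructor
    · rintro ⟨i, hi, hc⟩
      rw [PySem.List.mem_pyRange_one] at hi
      simp only [pvCondA, Bool.and_eq_true, bne_iff_ne, ne_eq, List.contains_iff_mem] at hc
      refine ⟨(i, i + 1), ?_, ?_⟩
      · apply adj_mem_zip _ (pvFem_pairwise d fn)
        · exact (pvFem_mem d fn i).mpr ⟨⟨hi.1, by omega⟩, hc.1.1⟩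
        · exact (pvFem_mem d fn (i + 1)).mpr ⟨⟨by omega, by omega⟩, hc.1.2⟩
      · simp [pvCondB, hc.2]
    · rintro ⟨⟨j, k⟩, hm, hc⟩
      simp only [pvCondB, Bool.and_eq_true, beq_iff_eq, bne_iff_ne, ne_eq] at hc
      obtain ⟨hk, hne⟩ := hc
      subst hk
      have hj : j ∈ pvFem d fn := (List.of_mem_zip hm).1
      have hk1 : j + 1 ∈ pvFem d fn := List.mem_of_mem_tail (List.of_mem_zip hm).2
      rw [pvFem_mem] at hj hk1
      refine ⟨j, ?_, ?_⟩
      · rw [PySem.List.mem_pyRange_one]; omega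
      · simp only [pvCondA, Bool.and_eq_true, bne_iff_ne, ne_eq, List.contains_iff_mem]
        exact ⟨⟨hj.2, hk1.2⟩, hne⟩
  exact Bool.coe_iff_coe.mp h

-- ===== VERDICT (by name: the statement is the Claim_ definition above) =====
theorem second_bechdel_score_spec : Claim_equal_second_bechdel_score := by
  intro d fn _
  show second_bechdel_score d fn = second_bechdel_score_alt d fn
  rw [second_bechdel_score, second_bechdel_score_alt, pvALoop_eq_any,
    pvBLoop_eq_scan d fn _ none]
  show _ = pvScan d (pvFem d fn)
  rw [pvScan, any_eq]
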